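-- pv_equiv track=rewrite | github.com/readicculus/noaadb | src/pipelines/partition_annotations/tasks/partition_annotations.py | _metrics_difference
-- ===== SOURCE A (Python) =====
-- def _metrics_difference(metrics):
--     # calculate difference between species distribution
--     species = list(metrics.values())[0].keys()
--     sp_diff = {}
--     for sp in species:
--         sp_metrics = []
--         for b_idx in metrics:
--             b_metric = metrics[b_idx]
--             sp_metrics.append(b_metric[sp])
--         ma = max(sp_metrics)
--         mi = min(sp_metrics)
--         sp_diff[sp] = abs(ma-mi)
--     return sp_diff
-- ===== SOURCE B (Python) =====
-- def _metrics_difference(metrics):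
--     # Single bucket-major pass keeping running minima/maxima per species,
--     # instead of materializing a per-species value list and reducing it.
--     species = list(metrics.values())[0].keys()
--     mn = {}
--     mx = {}
--     for b_idx in metrics:
--         b_metric = metrics[b_idx]
--         for sp in species:
--             v = b_metric[sp]
--             if sp in mn:
--                 if v < mn[sp]:
--                     mn[sp] = v
--             else:
--                 mn[sp] = v
--             if sp in mx:
--                 if v > mx[sp]:
--                     mx[sp] = v
--             else:
--                 mx[sp] = v
--     return {sp: abs(mx[sp] - mn[sp]) for sp in species}
-- ===== Notes on version B (the rewrite author's own statement) =====
-- stated objective: alternative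
-- what changed: Species-major loops that materialize a per-species value list and reduce it with max/min are replaced by one bucket-major traversal maintaining running minimum/maximum dicts, followed by a comprehension over the species.
import Mathlib
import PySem

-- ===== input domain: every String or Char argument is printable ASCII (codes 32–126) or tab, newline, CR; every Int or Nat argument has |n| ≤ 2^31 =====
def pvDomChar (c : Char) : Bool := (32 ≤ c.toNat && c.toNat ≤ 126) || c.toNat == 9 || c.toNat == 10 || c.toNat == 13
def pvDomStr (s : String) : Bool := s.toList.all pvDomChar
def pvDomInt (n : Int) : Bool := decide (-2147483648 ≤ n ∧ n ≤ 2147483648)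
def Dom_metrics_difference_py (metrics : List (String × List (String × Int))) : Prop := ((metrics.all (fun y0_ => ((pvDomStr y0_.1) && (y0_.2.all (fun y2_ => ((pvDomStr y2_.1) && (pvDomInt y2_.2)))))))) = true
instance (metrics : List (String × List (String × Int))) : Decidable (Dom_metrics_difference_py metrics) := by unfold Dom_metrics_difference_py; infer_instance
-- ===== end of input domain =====

-- B replaces A's species-major loops (materialize a per-species value list, then max/min)
-- by one bucket-major pass keeping running minima/maxima (objective: alternative).

-- dict lookup d[k] on an association list (first match; none = KeyError)
def pvLookup {ν : Type} (l : List (String × ν)) (k : String) : Option ν :=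
  (PySem.Dict.mk l).get? k

-- ===== PORT A =====
-- body of `for b_idx in metrics: sp_metrics.append(metrics[b_idx][sp])`
def pvASpMetricsStep (metrics : List (String × List (String × Int))) (sp : String)
    (lo : Option (List Int)) (b : String × List (String × Int)) : Option (List Int) :=
  lo.bind (fun l =>
    (pvLookup metrics b.1).bind (fun bm =>        -- b_metric = metrics[b_idx]
    (pvLookup bm sp).map (fun v => l ++ [v])))    -- sp_metrics.append(b_metric[sp])

-- body of `for sp in species: … sp_diff[sp] = abs(ma - mi)`
def pvASpStep (metrics : List (String × List (String × Int)))
    (acc : Option (PySem.Dict String Int)) (sp : String) : Option (PySem.Dict String Int) :=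
  acc.bind (fun d =>
    (metrics.foldl (pvASpMetricsStep metrics sp) (some [])).bind (fun l =>
      (PySem.List.max? l (fun x => x)).bind (fun ma =>
      (PySem.List.min? l (fun x => x)).map (fun mi =>
        d.insert sp |ma - mi|))))

def metrics_difference_py (metrics : List (String × List (String × Int))) : List (String × Int) :=
  -- species = list(metrics.values())[0].keys()
  match PySem.List.pyGet? (metrics.map Prod.snd) 0 with
  | none => []   -- IndexError on empty metrics (excluded by Pre_)
  | some first =>
    let species := first.map Prod.fst
    match species.foldl (pvASpStep metrics) (some PySem.Dict.empty) with
    | none => []  -- KeyError (excluded by Pre_)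
    | some d => d.items

-- ===== PORT B =====
-- body of `for sp in species:` (running min/max update with v = b_metric[sp])
def pvBInnerStep (bm : List (String × Int))
    (acc2 : Option (PySem.Dict String Int × PySem.Dict String Int)) (sp : String) :
    Option (PySem.Dict String Int × PySem.Dict String Int) :=
  acc2.bind (fun p =>
    (pvLookup bm sp).map (fun v =>
      let mn := if p.1.contains sp then
                  (if v < p.1.getD sp 0 then p.1.insert sp v else p.1)
                else p.1.insert sp v
      let mx := if p.2.contains sp then
                  (if v > p.2.getD sp 0 then p.2.insert sp v else p.2)
                else p.2.insert sp v
      (mn, mx)))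

-- body of `for b_idx in metrics:`
def pvBBucketStep (metrics : List (String × List (String × Int))) (species : List String)
    (acc : Option (PySem.Dict String Int × PySem.Dict String Int))
    (b : String × List (String × Int)) :
    Option (PySem.Dict String Int × PySem.Dict String Int) :=
  acc.bind (fun p =>
    (pvLookup metrics b.1).bind (fun bm =>        -- b_metric = metrics[b_idx]
      species.foldl (pvBInnerStep bm) (some p)))

-- body of `{sp: abs(mx[sp] - mn[sp]) for sp in species}`
def pvBOutStep (mn mx : PySem.Dict String Int)
    (acc : Option (PySem.Dict String Int)) (sp : String) : Option (PySem.Dict String Int) :=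
  acc.bind (fun d =>
    (mx.get? sp).bind (fun a =>
    (mn.get? sp).map (fun i => d.insert sp |a - i|)))

def metrics_difference_py_alt (metrics : List (String × List (String × Int))) : List (String × Int) :=
  match PySem.List.pyGet? (metrics.map Prod.snd) 0 with
  | none => []   -- IndexError on empty metrics (excluded by Pre_)
  | some first =>
    let species := first.map Prod.fst
    match metrics.foldl (pvBBucketStep metrics species) (some (PySem.Dict.empty, PySem.Dict.empty)) with
    | none => []  -- KeyError (excluded by Pre_)
    | some mnmx =>
      match species.foldl (pvBOutStep mnmx.1 mnmx.2) (some PySem.Dict.empty) with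
      | none => []
      | some d => d.items

-- ===== PRECONDITION & SPEC =====
-- Pre_ excludes: empty metrics (IndexError), buckets missing a species key of the first
-- bucket (KeyError), and association lists with duplicate outer or inner keys, which
-- cannot arise from a Python dict argument.
def Pre_metrics_difference_py (metrics : List (String × List (String × Int))) : Prop :=
  metrics ≠ [] ∧ (metrics.map Prod.fst).Nodup ∧
  (∀ b ∈ metrics, (b.2.map Prod.fst).Nodup) ∧
  (∀ b ∈ metrics, ∀ sp ∈ metrics.headI.2.map Prod.fst, sp ∈ b.2.map Prod.fst)
instance (metrics : List (String × List (String × Int))) : Decidable (Pre_metrics_difference_py metrics) := by unfold Pre_metrics_difference_py; infer_instance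

def pvWitness_metrics_difference_py : (List (String × List (String × Int))) :=
  [("b1", [("x", 3), ("y", -2)]), ("b2", [("x", 7), ("y", 5)])]

def Spec_metrics_difference_py (metrics : List (String × List (String × Int))) (out : List (String × Int)) : Prop := out = metrics_difference_py_alt metrics
instance (metrics : List (String × List (String × Int))) (out : List (String × Int)) : Decidable (Spec_metrics_difference_py metrics out) := by unfold Spec_metrics_difference_py; infer_instance

-- ===== CLAIM (what is proved, stated in full; the proofs are below) =====
def Claim_equal_metrics_difference_py : Prop := ∀ (metrics : List (String × List (String × Int))), Dom_metrics_difference_py metrics → Pre_metrics_difference_py metrics → Spec_metrics_difference_py metrics (metrics_difference_py metrics)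

-- ===== LEMMAS AND PROOFS =====

-- pure value metrics[b_idx][sp] (defined wherever Pre_ holds)
def pvVal (b : String × List (String × Int)) (sp : String) : Int := (pvLookup b.2 sp).getD 0

def pvOMin (o : Option Int) (v : Int) : Int := match o with | none => v | some a => min v a
def pvOMax (o : Option Int) (v : Int) : Int := match o with | none => v | some a => max v a

def pvAccMin : Option Int → List Int → Option Int
  | o, [] => o
  | o, v :: vs => pvAccMin (some (pvOMin o v)) vs
def pvAccMax : Option Int → List Int → Option Int
  | o, [] => o
  | o, v :: vs => pvAccMax (some (pvOMax o v)) vs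

def pvUpdMin (d : PySem.Dict String Int) (sp : String) (v : Int) : PySem.Dict String Int :=
  if d.contains sp then (if v < d.getD sp 0 then d.insert sp v else d) else d.insert sp v
def pvUpdMax (d : PySem.Dict String Int) (sp : String) (v : Int) : PySem.Dict String Int :=
  if d.contains sp then (if v > d.getD sp 0 then d.insert sp v else d) else d.insert sp v

def pvStep (species : List String) (b : String × List (String × Int))
    (p : PySem.Dict String Int × PySem.Dict String Int) :
    PySem.Dict String Int × PySem.Dict String Int :=
  species.foldl (fun p sp => (pvUpdMin p.1 sp (pvVal b sp), pvUpdMax p.2 sp (pvVal b sp))) p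

def pvDiffVal (b0 : String × List (String × Int)) (rest : List (String × List (String × Int)))
    (sp : String) : Int :=
  |((rest.map (fun b => pvVal b sp)).foldl max (pvVal b0 sp)) -
   ((rest.map (fun b => pvVal b sp)).foldl min (pvVal b0 sp))|

def pvPureRes (b0 : String × List (String × Int)) (rest : List (String × List (String × Int))) :
    List (String × Int) :=
  ((b0.2.map Prod.fst).foldl (fun d sp => d.insert sp (pvDiffVal b0 rest sp)) PySem.Dict.empty).items

-- generic: an Option-threaded foldl whose step stays `some` computes the pure foldl
lemma pvFoldlOpt {α β : Type} (l : List α) (f : Option β → α → Option β) (g : β → α → β)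
    (h : ∀ a ∈ l, ∀ b, f (some b) a = some (g b a)) (b0 : β) :
    l.foldl f (some b0) = some (l.foldl g b0) := by
  induction l generalizing b0 with
  | nil => rfl
  | cons x xs ih =>
    simp only [List.foldl_cons]
    rw [h x (by simp) b0]
    exact ih (fun a ha b => h a (List.mem_cons_of_mem _ ha) b) (g b0 x)

lemma pvLookup_outer {ν : Type} (m : List (String × ν)) (hnd : (m.map Prod.fst).Nodup)
    {b : String × ν} (hb : b ∈ m) : pvLookup m b.1 = some b.2 := by
  apply PySem.Dict.get?_of_mem_items (d := PySem.Dict.mk m) (v := b.2)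
  · simpa using hb
  · simpa [PySem.Dict.keys] using hnd

lemma pvLookup_inner {l : List (String × Int)} {sp : String} (h : sp ∈ l.map Prod.fst) :
    pvLookup l sp = some ((pvLookup l sp).getD 0) := by
  cases hv : pvLookup l sp with
  | some v => rfl
  | none =>
    exfalso
    have h2 := (PySem.Dict.get?_eq_none_iff_not_mem_keys (d := PySem.Dict.mk l) (k := sp)).mp hv
    exact h2 (by simpa [PySem.Dict.keys] using h)

lemma pvUpdMin_get? (d : PySem.Dict String Int) (sp k : String) (v : Int) :
    (pvUpdMin d sp v).get? k = if k = sp then some (pvOMin (d.get? sp) v) else d.get? k := by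
  unfold pvUpdMin pvOMin
  by_cases hk : k = sp
  · subst hk
    cases hd : d.get? k with
    | none =>
      have hc : d.contains k = false := by rw [PySem.Dict.contains_eq_isSome_get?, hd]; rfl
      simp [hc, PySem.Dict.get?_insert_self]
    | some a =>
      have hc : d.contains k = true := by rw [PySem.Dict.contains_eq_isSome_get?, hd]; rfl
      have hgd : d.getD k 0 = a := by rw [PySem.Dict.getD_eq_get?_getD, hd]; rfl
      rw [hc, hgd]
      simp only [if_true]
      by_cases hva : v < a
      · rw [if_pos hva, PySem.Dict.get?_insert_self]
        congr 1
        omega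
      · rw [if_neg hva, hd]
        congr 1
        omega
  · rw [if_neg hk]
    split_ifs <;> first | rfl | rw [PySem.Dict.get?_insert, if_neg hk]

lemma pvUpdMax_get? (d : PySem.Dict String Int) (sp k : String) (v : Int) :
    (pvUpdMax d sp v).get? k = if k = sp then some (pvOMax (d.get? sp) v) else d.get? k := by
  unfold pvUpdMax pvOMax
  by_cases hk : k = sp
  · subst hk
    cases hd : d.get? k with
    | none =>
      have hc : d.contains k = false := by rw [PySem.Dict.contains_eq_isSome_get?, hd]; rfl
      simp [hc, PySem.Dict.get?_insert_self]
    | some a =>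
      have hc : d.contains k = true := by rw [PySem.Dict.contains_eq_isSome_get?, hd]; rfl
      have hgd : d.getD k 0 = a := by rw [PySem.Dict.getD_eq_get?_getD, hd]; rfl
      rw [hc, hgd]
      simp only [if_true]
      by_cases hva : v > a
      · rw [if_pos hva, PySem.Dict.get?_insert_self]
        congr 1
        omega
      · rw [if_neg hva, hd]
        congr 1
        omega
  · rw [if_neg hk]
    split_ifs <;> first | rfl | rw [PySem.Dict.get?_insert, if_neg hk]

lemma pvOMin_idem (o : Option Int) (v : Int) : pvOMin (some (pvOMin o v)) v = pvOMin o v := by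
  cases o with
  | none => simp [pvOMin]
  | some a =>
    simp only [pvOMin]
    omega

lemma pvOMax_idem (o : Option Int) (v : Int) : pvOMax (some (pvOMax o v)) v = pvOMax o v := by
  cases o with
  | none => simp [pvOMax]
  | some a =>
    simp only [pvOMax]
    omega

lemma pvStep_get? (species : List String) (b : String × List (String × Int))
    (p : PySem.Dict String Int × PySem.Dict String Int) (sp : String) :
    ((pvStep species b p).1.get? sp
       = if sp ∈ species then some (pvOMin (p.1.get? sp) (pvVal b sp)) else p.1.get? sp)
    ∧ ((pvStep species b p).2.get? sp
       = if sp ∈ species then some (pvOMax (p.2.get? sp) (pvVal b sp)) else p.2.get? sp) := by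
  induction species generalizing p with
  | nil => simp [pvStep]
  | cons t ts ih =>
    unfold pvStep
    simp only [List.foldl_cons]
    obtain ⟨ih1, ih2⟩ := ih (pvUpdMin p.1 t (pvVal b t), pvUpdMax p.2 t (pvVal b t))
    unfold pvStep at ih1 ih2
    rw [ih1, ih2]
    by_cases hst : sp = t
    · subst hst
      by_cases hmem : sp ∈ ts
      · simp [hmem, pvUpdMin_get?, pvUpdMax_get?, pvOMin_idem, pvOMax_idem]
      · simp [hmem, pvUpdMin_get?, pvUpdMax_get?]
    · have h1 : (pvUpdMin p.1 t (pvVal b t)).get? sp = p.1.get? sp := by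
        rw [pvUpdMin_get?, if_neg hst]
      have h2 : (pvUpdMax p.2 t (pvVal b t)).get? sp = p.2.get? sp := by
        rw [pvUpdMax_get?, if_neg hst]
      rw [h1, h2]
      have hiff : (sp ∈ t :: ts) ↔ (sp ∈ ts) := by simp [hst]
      rw [if_congr hiff rfl rfl, if_congr hiff rfl rfl]
      exact ⟨rfl, rfl⟩

lemma pvBuckets_get? (species : List String) (sp : String) (hsp : sp ∈ species)
    (l : List (String × List (String × Int)))
    (p : PySem.Dict String Int × PySem.Dict String Int) :
    ((l.foldl (fun p b => pvStep species b p) p).1.get? sp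
       = pvAccMin (p.1.get? sp) (l.map (fun b => pvVal b sp)))
    ∧ ((l.foldl (fun p b => pvStep species b p) p).2.get? sp
       = pvAccMax (p.2.get? sp) (l.map (fun b => pvVal b sp))) := by
  induction l generalizing p with
  | nil => exact ⟨rfl, rfl⟩
  | cons x xs ih =>
    simp only [List.foldl_cons, List.map_cons]
    obtain ⟨ih1, ih2⟩ := ih (pvStep species x p)
    obtain ⟨hs1, hs2⟩ := pvStep_get? species x p sp
    rw [if_pos hsp] at hs1 hs2
    constructor
    · rw [ih1, hs1]
      rfl
    · rw [ih2, hs2]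
      rfl

lemma pvAccMin_some (a : Int) (vs : List Int) : pvAccMin (some a) vs = some (vs.foldl min a) := by
  induction vs generalizing a with
  | nil => rfl
  | cons v vs ih =>
    simp only [pvAccMin, pvOMin, List.foldl_cons]
    rw [ih (min v a), min_comm v a]

lemma pvAccMax_some (a : Int) (vs : List Int) : pvAccMax (some a) vs = some (vs.foldl max a) := by
  induction vs generalizing a with
  | nil => rfl
  | cons v vs ih =>
    simp only [pvAccMax, pvOMax, List.foldl_cons]
    rw [ih (max v a), max_comm v a]

lemma pvAccMin_none (v : Int) (vs : List Int) : pvAccMin none (v :: vs) = some (vs.foldl min v) := by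
  simp only [pvAccMin, pvOMin]
  exact pvAccMin_some v vs

lemma pvAccMax_none (v : Int) (vs : List Int) : pvAccMax none (v :: vs) = some (vs.foldl max v) := by
  simp only [pvAccMax, pvOMax]
  exact pvAccMax_some v vs

lemma pvFoldlAppend {α β : Type} (f : α → β) (l : List α) (acc : List β) :
    l.foldl (fun l b => l ++ [f b]) acc = acc ++ l.map f := by
  induction l generalizing acc with
  | nil => simp
  | cons x xs ih => simp [ih]

-- A's result under Pre_, in closed pure form
lemma pvA_eq (b0 : String × List (String × Int)) (rest : List (String × List (String × Int)))
    (hnd : (((b0 :: rest)).map Prod.fst).Nodup)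
    (hval : ∀ b ∈ b0 :: rest, ∀ sp ∈ b0.2.map Prod.fst, pvLookup b.2 sp = some (pvVal b sp)) :
    metrics_difference_py (b0 :: rest) = pvPureRes b0 rest := by
  have hget : PySem.List.pyGet? ((b0 :: rest).map Prod.snd) 0 = some b0.2 := by
    simp [PySem.List.pyGet?, PySem.List.pyIdx?]
  have hfold : (b0.2.map Prod.fst).foldl (pvASpStep (b0 :: rest)) (some PySem.Dict.empty)
      = some ((b0.2.map Prod.fst).foldl
          (fun d sp => d.insert sp (pvDiffVal b0 rest sp)) PySem.Dict.empty) := by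
    apply pvFoldlOpt
    intro sp hsp d
    have hmet : (b0 :: rest).foldl (pvASpMetricsStep (b0 :: rest) sp) (some [])
        = some ((b0 :: rest).map (fun b => pvVal b sp)) := by
      have hstep : ∀ b ∈ b0 :: rest, ∀ l,
          pvASpMetricsStep (b0 :: rest) sp (some l) b = some (l ++ [pvVal b sp]) := by
        intro b hb l
        unfold pvASpMetricsStep
        rw [Option.bind_some, pvLookup_outer _ hnd hb, Option.bind_some, hval b hb sp hsp]
        rfl
      rw [pvFoldlOpt (b0 :: rest) _ (fun l b => l ++ [pvVal b sp]) hstep [], pvFoldlAppend]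
      simp
    unfold pvASpStep
    rw [Option.bind_some, hmet, Option.bind_some, List.map_cons,
        PySem.List.max?_id_cons, Option.bind_some, PySem.List.min?_id_cons]
    rfl
  unfold metrics_difference_py
  rw [hget]
  simp only [hfold]
  rfl

-- B's result under Pre_, in the same closed pure form
lemma pvB_eq (b0 : String × List (String × Int)) (rest : List (String × List (String × Int)))
    (hnd : (((b0 :: rest)).map Prod.fst).Nodup)
    (hval : ∀ b ∈ b0 :: rest, ∀ sp ∈ b0.2.map Prod.fst, pvLookup b.2 sp = some (pvVal b sp)) :
    metrics_difference_py_alt (b0 :: rest) = pvPureRes b0 rest := by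
  have hget : PySem.List.pyGet? ((b0 :: rest).map Prod.snd) 0 = some b0.2 := by
    simp [PySem.List.pyGet?, PySem.List.pyIdx?]
  have hbuckets : (b0 :: rest).foldl (pvBBucketStep (b0 :: rest) (b0.2.map Prod.fst))
      (some (PySem.Dict.empty, PySem.Dict.empty))
      = some ((b0 :: rest).foldl (fun p b => pvStep (b0.2.map Prod.fst) b p)
          (PySem.Dict.empty, PySem.Dict.empty)) := by
    apply pvFoldlOpt
    intro b hb p
    unfold pvBBucketStep
    rw [Option.bind_some, pvLookup_outer _ hnd hb, Option.bind_some]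
    have hinner : ∀ sp ∈ b0.2.map Prod.fst,
        ∀ q : PySem.Dict String Int × PySem.Dict String Int,
        pvBInnerStep b.2 (some q) sp
          = some (pvUpdMin q.1 sp (pvVal b sp), pvUpdMax q.2 sp (pvVal b sp)) := by
      intro sp hsp q
      unfold pvBInnerStep
      rw [Option.bind_some, hval b hb sp hsp]
      rfl
    rw [pvFoldlOpt (b0.2.map Prod.fst) _
        (fun q sp => (pvUpdMin q.1 sp (pvVal b sp), pvUpdMax q.2 sp (pvVal b sp))) hinner p]
    rfl
  have hmn : ∀ sp ∈ b0.2.map Prod.fst,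
      ((b0 :: rest).foldl (fun p b => pvStep (b0.2.map Prod.fst) b p)
        (PySem.Dict.empty, PySem.Dict.empty)).1.get? sp
      = some ((rest.map (fun b => pvVal b sp)).foldl min (pvVal b0 sp)) := by
    intro sp hsp
    obtain ⟨h1, _⟩ := pvBuckets_get? (b0.2.map Prod.fst) sp hsp (b0 :: rest)
      (PySem.Dict.empty, PySem.Dict.empty)
    rw [h1]
    simp only [PySem.Dict.get?_empty, List.map_cons]
    exact pvAccMin_none _ _
  have hmx : ∀ sp ∈ b0.2.map Prod.fst,
      ((b0 :: rest).foldl (fun p b => pvStep (b0.2.map Prod.fst) b p)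
        (PySem.Dict.empty, PySem.Dict.empty)).2.get? sp
      = some ((rest.map (fun b => pvVal b sp)).foldl max (pvVal b0 sp)) := by
    intro sp hsp
    obtain ⟨_, h2⟩ := pvBuckets_get? (b0.2.map Prod.fst) sp hsp (b0 :: rest)
      (PySem.Dict.empty, PySem.Dict.empty)
    rw [h2]
    simp only [PySem.Dict.get?_empty, List.map_cons]
    exact pvAccMax_none _ _
  have hout : (b0.2.map Prod.fst).foldl
      (pvBOutStep
        ((b0 :: rest).foldl (fun p b => pvStep (b0.2.map Prod.fst) b p)
          (PySem.Dict.empty, PySem.Dict.empty)).1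
        ((b0 :: rest).foldl (fun p b => pvStep (b0.2.map Prod.fst) b p)
          (PySem.Dict.empty, PySem.Dict.empty)).2)
      (some PySem.Dict.empty)
      = some ((b0.2.map Prod.fst).foldl
          (fun d sp => d.insert sp (pvDiffVal b0 rest sp)) PySem.Dict.empty) := by
    apply pvFoldlOpt
    intro sp hsp d
    unfold pvBOutStep
    rw [Option.bind_some, hmx sp hsp, Option.bind_some, hmn sp hsp]
    rfl
  unfold metrics_difference_py_alt
  rw [hget]
  simp only [hbuckets]
  simp only [hout]
  rfl

-- ===== VERDICT (by name: the statement is the Claim_ definition above) =====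
theorem metrics_difference_py_spec : Claim_equal_metrics_difference_py := by
  intro m _hdom hpre
  obtain ⟨hne, hnd, _hinner, hcov⟩ := hpre
  unfold Spec_metrics_difference_py
  cases m with
  | nil => exact absurd rfl hne
  | cons b0 rest =>
    have hcov' : ∀ b ∈ b0 :: rest, ∀ sp ∈ b0.2.map Prod.fst, sp ∈ b.2.map Prod.fst := by
      simpa using hcov
    have hval : ∀ b ∈ b0 :: rest, ∀ sp ∈ b0.2.map Prod.fst,
        pvLookup b.2 sp = some (pvVal b sp) := by
      intro b hb sp hsp
      exact pvLookup_inner (hcov' b hb sp hsp)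
    rw [pvA_eq b0 rest hnd hval, pvB_eq b0 rest hnd hval]
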